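-- pv_equiv track=rewrite | github.com/CMU15-112/lecture_demos_qatar | Week4/Lect1/CT2.py | ct2
-- ===== SOURCE A (Python) =====
-- def ct2(n):
--     s, t = set(), set()
--     while (n > 0):
--         (d, n) = (n%10, n//10)
--         if (d in t): t.remove(d)
--         elif (d in s): t.add(d)
--         s.add(d)
--     return sorted(t)
-- ===== SOURCE B (Python) =====
-- def ct2(n):
--     counts = {}
--     while n > 0:
--         d, n = n % 10, n // 10
--         counts[d] = counts.get(d, 0) + 1
--     return sorted(d for d, c in counts.items() if c % 2 == 0)
-- ===== Notes on version B (the rewrite author's own statement) =====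
-- stated objective: alternative
-- what changed: Replaces the incremental two-set seen/toggle bookkeeping with a tabulate-then-filter pass: one arithmetic digit loop builds a count dict, then the digits whose count is even (hence occurring 2,4,... times, matching A's toggle) are filtered out and sorted.
import Mathlib
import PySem

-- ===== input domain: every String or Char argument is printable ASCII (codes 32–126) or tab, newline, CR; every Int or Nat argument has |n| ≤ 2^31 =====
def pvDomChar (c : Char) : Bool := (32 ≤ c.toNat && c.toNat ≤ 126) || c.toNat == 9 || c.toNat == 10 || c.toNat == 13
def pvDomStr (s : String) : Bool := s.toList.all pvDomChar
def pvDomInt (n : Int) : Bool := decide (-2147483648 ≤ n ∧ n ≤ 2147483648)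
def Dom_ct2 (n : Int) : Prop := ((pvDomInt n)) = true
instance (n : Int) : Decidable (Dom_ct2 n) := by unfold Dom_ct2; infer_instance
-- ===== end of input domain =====

-- B replaces A's incremental two-set toggle bookkeeping with a count-dict built in one digit loop
-- followed by a filter of the even-count digits; same return value, no speed claim.

theorem ct2_floordiv_toNat_lt (n : Int) (h : 0 < n) :
    (PySem.Int.floordiv n 10).toNat < n.toNat := by
  rw [PySem.Int.floordiv_eq_ediv_of_pos (by omega)]
  omega

-- ===== PORT A =====
-- while (n > 0): d, n = n%10, n//10; toggle d between s and t
-- (t.remove(d) is ported as Set.discard, exact here because it runs only under 'if d in t')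
def ct2Loop (n : Int) (s t : PySem.Set Int) : PySem.Set Int :=
  if h : 0 < n then
    let d := PySem.Int.mod n 10
    let t' := if PySem.Set.contains t d then PySem.Set.discard t d
              else if PySem.Set.contains s d then PySem.Set.add t d
              else t
    ct2Loop (PySem.Int.floordiv n 10) (PySem.Set.add s d) t'
  else t
termination_by n.toNat
decreasing_by exact ct2_floordiv_toNat_lt n h

def ct2 (n : Int) : List Int :=
  PySem.List.sorted (ct2Loop n PySem.Set.empty PySem.Set.empty) (fun x => x) false

-- ===== PORT B =====
-- while n > 0: counts[d] = counts.get(d, 0) + 1;  then sorted(d for d, c in counts.items() if c % 2 == 0)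
def ct2AltLoop (n : Int) (c : PySem.Dict Int Int) : PySem.Dict Int Int :=
  if h : 0 < n then
    ct2AltLoop (PySem.Int.floordiv n 10)
      (c.insert (PySem.Int.mod n 10) (c.getD (PySem.Int.mod n 10) 0 + 1))
  else c
termination_by n.toNat
decreasing_by exact ct2_floordiv_toNat_lt n h

def ct2_alt (n : Int) : List Int :=
  PySem.List.sorted
    ((((ct2AltLoop n PySem.Dict.empty).items.filter
        (fun p => PySem.Int.mod p.2 2 == 0)).map Prod.fst))
    (fun x => x) false

-- ===== PRECONDITION & SPEC =====
def Spec_ct2 (n : Int) (out : List Int) : Prop := out = ct2_alt n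
instance (n : Int) (out : List Int) : Decidable (Spec_ct2 n out) := by unfold Spec_ct2; infer_instance

-- ===== CLAIM (what is proved, stated in full; the proofs are below) =====
def Claim_equal_ct2 : Prop := ∀ (n : Int), Dom_ct2 n → Spec_ct2 n (ct2 n)

-- ===== LEMMAS AND PROOFS =====

-- the digit stream both loops consume, least-significant first
def pvDigits (n : Int) : List Int :=
  if h : 0 < n then PySem.Int.mod n 10 :: pvDigits (PySem.Int.floordiv n 10) else []
termination_by n.toNat
decreasing_by exact ct2_floordiv_toNat_lt n h

def pvStepA (p : PySem.Set Int × PySem.Set Int) (d : Int) : PySem.Set Int × PySem.Set Int :=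
  (PySem.Set.add p.1 d,
   if PySem.Set.contains p.2 d then PySem.Set.discard p.2 d
   else if PySem.Set.contains p.1 d then PySem.Set.add p.2 d
   else p.2)

theorem ct2Loop_eq_foldl (n : Int) (s t : PySem.Set Int) :
    ct2Loop n s t = ((pvDigits n).foldl pvStepA (s, t)).2 := by
  induction n, s, t using ct2Loop.induct with
  | case1 n s t h d t' ih =>
    rw [ct2Loop, pvDigits]
    simp only [h, dif_pos, List.foldl_cons]
    exact ih
  | case2 n s t h =>
    rw [ct2Loop, pvDigits]
    simp [h]

theorem ct2AltLoop_eq_foldl (n : Int) (c : PySem.Dict Int Int) :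
    ct2AltLoop n c = (pvDigits n).foldl (fun c x => c.insert x (c.getD x 0 + 1)) c := by
  induction n, c using ct2AltLoop.induct with
  | case1 n c h ih =>
    rw [ct2AltLoop, pvDigits]
    simp only [h, dif_pos, List.foldl_cons]
    exact ih
  | case2 n c h =>
    rw [ct2AltLoop, pvDigits]
    simp [h]

-- invariant of A's loop: s is the seen set, t holds the digits with even positive count
theorem foldl_stepA_spec (ds : List Int) :
    ((ds.foldl pvStepA (PySem.Set.empty, PySem.Set.empty)).1 = PySem.Set.ofList ds) ∧
    ((ds.foldl pvStepA (PySem.Set.empty, PySem.Set.empty)).2).Nodup ∧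
    (∀ x : Int, x ∈ (ds.foldl pvStepA (PySem.Set.empty, PySem.Set.empty)).2 ↔
        x ∈ ds ∧ ds.count x % 2 = 0) := by
  induction ds using List.reverseRecOn with
  | nil => simp [PySem.Set.empty, PySem.Set.ofList]
  | append_singleton ds d ih =>
    rw [List.foldl_append, List.foldl_cons, List.foldl_nil]
    set acc := ds.foldl pvStepA (PySem.Set.empty, PySem.Set.empty) with hacc
    obtain ⟨hs, hnd, hmem⟩ := ih
    have hfst : (pvStepA acc d).1 = PySem.Set.ofList (ds ++ [d]) := by
      rw [PySem.Set.ofList_append_singleton, ← hs]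
      rfl
    by_cases h1 : d ∈ acc.2
    · -- 3rd, 5th, ... occurrence: d is removed from t
      have hc : PySem.Set.contains acc.2 d = true := by simp [h1]
      have hstep : (pvStepA acc d).2 = PySem.Set.discard acc.2 d := by
        simp only [pvStepA]; rw [hc]; simp
      refine ⟨hfst, ?_, ?_⟩
      · rw [hstep]; exact PySem.Set.nodup_discard _ _ hnd
      · intro x
        rw [hstep, PySem.Set.mem_discard]
        have hd := (hmem d).mp h1
        by_cases hxd : x = d
        · subst hxd
          simp [List.count_append]
          omega
        · have hcnt : (ds ++ [d]).count x = ds.count x := by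
            simp [List.count_append, Ne.symm hxd]
          rw [hcnt]
          simp [hmem x, hxd]
    · have hc : PySem.Set.contains acc.2 d = false := by simp [h1]
      by_cases h2 : d ∈ ds
      · -- 2nd, 4th, ... occurrence: d joins t
        have hc1 : PySem.Set.contains acc.1 d = true := by
          rw [hs]; simp [PySem.Set.mem_ofList, h2]
        have hstep : (pvStepA acc d).2 = PySem.Set.add acc.2 d := by
          simp only [pvStepA]; rw [hc, hc1]; simp
        have hodd : ¬ (ds.count d % 2 = 0) := fun he => h1 ((hmem d).mpr ⟨h2, he⟩)
        refine ⟨hfst, ?_, ?_⟩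
        · rw [hstep]; exact PySem.Set.nodup_add _ _ hnd
        · intro x
          rw [hstep, PySem.Set.mem_add]
          by_cases hxd : x = d
          · subst hxd
            simp [hmem x, List.count_append, h2]
            omega
          · have hcnt : (ds ++ [d]).count x = ds.count x := by
              simp [List.count_append, Ne.symm hxd]
            rw [hcnt]
            simp [hmem x, hxd]
      · -- 1st occurrence of d: t unchanged
        have hc1 : PySem.Set.contains acc.1 d = false := by
          rw [hs]; simp [PySem.Set.mem_ofList, h2]
        have hstep : (pvStepA acc d).2 = acc.2 := by
          simp only [pvStepA]; rw [hc, hc1]; simp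
        refine ⟨hfst, ?_, ?_⟩
        · rw [hstep]; exact hnd
        · intro x
          rw [hstep]
          by_cases hxd : x = d
          · subst hxd
            have : x ∉ acc.2 := fun hx => h2 ((hmem x).mp hx).1
            simp [this, List.count_append, List.count_eq_zero_of_not_mem h2]
          · have hcnt : (ds ++ [d]).count x = ds.count x := by
              simp [List.count_append, Ne.symm hxd]
            rw [hcnt]
            simp [hmem x, hxd]

-- B's dict after the loop is Counter(digits)
theorem ct2AltLoop_eq_counter (n : Int) :
    ct2AltLoop n PySem.Dict.empty = PySem.Dict.counter (pvDigits n) := by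
  rw [ct2AltLoop_eq_foldl, PySem.Dict.foldl_insert_getD_add_one_eq_counter]

theorem ct2_alt_filter (n : Int) :
    (((ct2AltLoop n PySem.Dict.empty).items.filter
        (fun p => PySem.Int.mod p.2 2 == 0)).map Prod.fst)
      = (PySem.Set.ofList (pvDigits n)).filter
          (fun k => (pvDigits n).count k % 2 == 0) := by
  rw [ct2AltLoop_eq_counter, PySem.Dict.items_counter, List.filter_map, List.map_map]
  have hpred : ∀ k : Int,
      (PySem.Int.mod ((pvDigits n).count k : Int) 2 == 0) = ((pvDigits n).count k % 2 == 0) := by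
    intro k
    have h2 : PySem.Int.mod ((pvDigits n).count k : Int) 2
        = (((pvDigits n).count k % 2 : Nat) : Int) := by
      exact_mod_cast PySem.Int.mod_natCast _ 2
    rw [h2]
    simp
    omega
  simp only [Function.comp_def, hpred, List.map_id']

-- ===== VERDICT (by name: the statement is the Claim_ definition above) =====
theorem ct2_spec : Claim_equal_ct2 := by
  intro n _
  unfold Spec_ct2 ct2 ct2_alt
  rw [ct2_alt_filter, ct2Loop_eq_foldl]
  apply (PySem.List.sorted_id_eq_sorted_id_iff_perm _ _).mpr
  obtain ⟨_, hnd, hmem⟩ := foldl_stepA_spec (pvDigits n)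
  apply (List.perm_ext_iff_of_nodup hnd (List.Nodup.filter _ (PySem.Set.nodup_ofList _))).mpr
  intro x
  rw [hmem, List.mem_filter, PySem.Set.mem_ofList]
  simp
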